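-- pv_equiv track=rewrite | github.com/epsalt/aoc2019 | day16.py | csum
-- ===== SOURCE A (Python) =====
-- from itertools import count, cycle, islice
--
-- def csum(signal, offset):
--     cyc = cycle(signal)
--
--     n = total = 0
--     new = []
--     while n < offset:
--         total += next(cyc)
--         new.append(total % 10)
--         n += 1
--
--     return new
-- ===== SOURCE B (Python) =====
-- from itertools import accumulate
--
-- def csum(sig, offset):
--     out = []
--     if offset > 0:
--         prefix = list(accumulate(sig))
--         period = prefix[-1]
--         L = len(sig)
--         for i in range(1, offset + 1):
--             q, r = divmod(i, L)
--             total = q * period + (prefix[r - 1] if r else 0)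
--             out.append(total % 10)
--     return out
-- ===== Notes on version B (the rewrite author's own statement) =====
-- stated objective: alternative
-- what changed: B replaces element-by-element advancement of a cycled iterator carrying a running total with a prefix-sum table of the signal plus divmod indexing (total = q*period + prefix[r-1]), computing each output term directly; same cost overall.
import Mathlib
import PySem

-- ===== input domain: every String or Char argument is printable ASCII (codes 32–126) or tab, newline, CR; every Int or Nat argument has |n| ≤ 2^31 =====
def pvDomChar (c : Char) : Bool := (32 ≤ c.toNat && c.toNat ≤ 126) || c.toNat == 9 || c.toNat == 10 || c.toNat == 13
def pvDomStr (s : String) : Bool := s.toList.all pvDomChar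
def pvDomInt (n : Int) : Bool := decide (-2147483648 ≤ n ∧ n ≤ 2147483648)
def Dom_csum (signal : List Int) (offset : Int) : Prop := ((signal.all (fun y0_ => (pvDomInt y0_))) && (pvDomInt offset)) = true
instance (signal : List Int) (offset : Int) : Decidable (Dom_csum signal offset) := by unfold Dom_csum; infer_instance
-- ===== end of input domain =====

-- B replaces the element-by-element cycled-iterator loop with a prefix-sum table plus divmod indexing (objective: alternative direct-indexing algorithm).

-- ===== PORT A =====
-- the while loop: state (idx into cycle, running total, accumulator); runs max(offset,0) times
def csumGo (signal : List Int) : Nat → Nat → Int → List Int → List Int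
  | 0, _, _, acc => acc.reverse
  | k+1, idx, total, acc =>
    let total' := total + signal.getD idx 0
    csumGo signal k ((idx + 1) % signal.length) total' (PySem.Int.mod total' 10 :: acc)

def csum (signal : List Int) (offset : Int) : List Int :=
  csumGo signal offset.toNat 0 0 []

-- ===== PORT B =====
-- accumulate(signal): running prefix sums
def accPrefix (t : Int) : List Int → List Int
  | [] => []
  | x :: xs => (t + x) :: accPrefix (t + x) xs

def csum_alt (signal : List Int) (offset : Int) : List Int :=
  if 0 < offset then
    let pre := accPrefix 0 signal
    let period := PySem.List.pyGetD pre (-1) 0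
    let L : Int := signal.length
    (PySem.List.pyRange 1 (offset + 1) 1).map (fun i =>
      let q := PySem.Int.floordiv i L
      let r := PySem.Int.mod i L
      let total := q * period + (if r ≠ 0 then PySem.List.pyGetD pre (r - 1) 0 else 0)
      PySem.Int.mod total 10)
  else []

-- ===== PRECONDITION & SPEC =====
-- Pre_ excludes only the inputs where A raises (StopIteration from next(cycle([])) when offset > 0); B raises there too (ZeroDivisionError).
def Pre_csum (signal : List Int) (offset : Int) : Prop := signal ≠ [] ∨ offset ≤ 0
instance (signal : List Int) (offset : Int) : Decidable (Pre_csum signal offset) := by unfold Pre_csum; infer_instance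
def pvWitness_csum : List Int × Int := ([1, 2, 3], 5)

def Spec_csum (signal : List Int) (offset : Int) (out : List Int) : Prop := out = csum_alt signal offset
instance (signal : List Int) (offset : Int) (out : List Int) : Decidable (Spec_csum signal offset out) := by unfold Spec_csum; infer_instance

-- ===== CLAIM (what is proved, stated in full; the proofs are below) =====
def Claim_equal_csum : Prop := ∀ (signal : List Int) (offset : Int), Dom_csum signal offset → Pre_csum signal offset → Spec_csum signal offset (csum signal offset)

-- ===== LEMMAS AND PROOFS =====

-- cumulative sum of the cycled signal after n steps
def cycSum (signal : List Int) : Nat → Int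
  | 0 => 0
  | n+1 => cycSum signal n + signal.getD (n % signal.length) 0

lemma mod_succ_mod (n L : Nat) : (n % L + 1) % L = (n + 1) % L := by
  conv_rhs => rw [Nat.add_mod]
  conv_lhs => rw [Nat.add_mod, Nat.mod_mod_of_dvd _ dvd_rfl]

lemma csumGo_eq (signal : List Int) :
    ∀ (k n : Nat) (acc : List Int),
      csumGo signal k (n % signal.length) (cycSum signal n) acc
        = acc.reverse ++ (List.range k).map (fun j => PySem.Int.mod (cycSum signal (n + 1 + j)) 10) := by
  intro k
  induction k with
  | zero => intro n acc; simp [csumGo]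
  | succ k ih =>
    intro n acc
    have h1 : cycSum signal n + signal.getD (n % signal.length) 0 = cycSum signal (n + 1) := rfl
    rw [csumGo, h1, mod_succ_mod]
    rw [ih (n + 1) (PySem.Int.mod (cycSum signal (n + 1)) 10 :: acc)]
    rw [List.range_succ_eq_map]
    simp [List.map_map, Function.comp]
    intro a _
    have : n + 1 + 1 + a = n + 1 + (a + 1) := by omega
    rw [this]

lemma take_sum_succ (signal : List Int) (k : Nat) (hk : k < signal.length) :
    (signal.take (k + 1)).sum = (signal.take k).sum + signal.getD k 0 := by
  rw [List.take_add_one, List.sum_append]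
  congr 1
  simp [List.getElem?_eq_getElem hk, List.getD_eq_getElem?_getD]

lemma cycSum_closed (signal : List Int) (h : signal ≠ []) (n : Nat) :
    cycSum signal n
      = ((n / signal.length : Nat) : Int) * signal.sum + (signal.take (n % signal.length)).sum := by
  have hL : 0 < signal.length := List.length_pos_iff.mpr h
  induction n with
  | zero => simp [cycSum]
  | succ n ih =>
    have hr : n % signal.length < signal.length := Nat.mod_lt _ hL
    rw [cycSum, ih]
    by_cases hcase : n % signal.length + 1 = signal.length
    · -- wrap around: remainder becomes 0, quotient increments
      have hmod1 : (n + 1) % signal.length = 0 := by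
        rw [← mod_succ_mod, hcase, Nat.mod_self]
      have hdvd : signal.length ∣ n + 1 := Nat.dvd_of_mod_eq_zero hmod1
      have hdiv : (n + 1) / signal.length = n / signal.length + 1 := by
        rw [Nat.succ_div, if_pos hdvd]
      have hsum : (signal.take (n % signal.length)).sum + signal.getD (n % signal.length) 0 = signal.sum := by
        rw [← take_sum_succ signal _ hr, hcase, List.take_length]
      rw [hmod1, hdiv]
      push_cast
      rw [add_assoc, hsum]
      simp
      ring
    · -- no wrap: remainder increments, quotient unchanged
      have hlt : n % signal.length + 1 < signal.length :=
        lt_of_le_of_ne hr hcase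
      have hmod1 : (n + 1) % signal.length = n % signal.length + 1 := by
        rw [← mod_succ_mod, Nat.mod_eq_of_lt hlt]
      have hndvd : ¬ signal.length ∣ n + 1 := by
        rintro ⟨c, hc⟩
        have h0 : (n + 1) % signal.length = 0 := by rw [hc, Nat.mul_mod_right]
        omega
      have hdiv : (n + 1) / signal.length = n / signal.length := by
        rw [Nat.succ_div, if_neg hndvd, Nat.add_zero]
      rw [hmod1, hdiv, take_sum_succ signal _ hr]
      ring

lemma accPrefix_length (t : Int) (xs : List Int) : (accPrefix t xs).length = xs.length := by
  induction xs generalizing t with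
  | nil => rfl
  | cons x xs ih => simp [accPrefix, ih]

lemma accPrefix_getD (t : Int) (xs : List Int) (k : Nat) (hk : k < xs.length) :
    (accPrefix t xs).getD k 0 = t + (xs.take (k + 1)).sum := by
  induction xs generalizing t k with
  | nil => simp at hk
  | cons x xs ih =>
    cases k with
    | zero => simp [accPrefix]
    | succ k =>
      simp only [accPrefix, List.getD_cons_succ]
      rw [ih (t + x) k (by simpa using hk)]
      simp [add_assoc]

lemma accPrefix_last (signal : List Int) (h : signal ≠ []) :
    PySem.List.pyGetD (accPrefix 0 signal) (-1) 0 = signal.sum := by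
  have hne : accPrefix 0 signal ≠ [] := by
    cases signal with
    | nil => exact absurd rfl h
    | cons x xs => simp [accPrefix]
  rw [PySem.List.pyGetD_neg_one _ _ hne, List.getLast_eq_getElem]
  have hlen := accPrefix_length 0 signal
  have hlt : (accPrefix 0 signal).length - 1 < signal.length := by
    have := List.length_pos_iff.mpr h; omega
  rw [← List.getD_eq_getElem _ 0]
  rw [accPrefix_getD 0 signal _ hlt]
  have : (accPrefix 0 signal).length - 1 + 1 = signal.length := by
    have := List.length_pos_iff.mpr h; omega
  rw [this, List.take_length]
  ring

lemma main_eq (signal : List Int) (offset : Int) (hpre : Pre_csum signal offset) :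
    csum signal offset = csum_alt signal offset := by
  by_cases hoff : 0 < offset
  · have hne : signal ≠ [] := by
      rcases hpre with h | h
      · exact h
      · omega
    have hL : 0 < signal.length := List.length_pos_iff.mpr hne
    unfold csum csum_alt
    rw [if_pos hoff, PySem.List.pyRange_one]
    have h1 : (offset + 1 - 1).toNat = offset.toNat := by omega
    rw [h1]
    have hA := csumGo_eq signal offset.toNat 0 []
    simp only [Nat.zero_mod] at hA
    rw [show cycSum signal 0 = 0 from rfl] at hA
    rw [hA]
    simp only [List.reverse_nil, List.nil_append]
    rw [List.map_map]
    apply List.map_congr_left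
    intro j hj
    simp only [Function.comp_apply]
    have hi : (1 + (j : Int)) = ((j + 1 : Nat) : Int) := by push_cast; ring
    rw [hi]
    rw [PySem.Int.floordiv_natCast, PySem.Int.mod_natCast]
    rw [accPrefix_last signal hne]
    rw [show (0 : Nat) + 1 + j = j + 1 from by omega]
    rw [cycSum_closed signal hne (j + 1)]
    congr 1
    by_cases hr0 : (j + 1) % signal.length = 0
    · rw [hr0]
      simp
    · have hrpos : 0 < (j + 1) % signal.length := Nat.pos_of_ne_zero hr0
      have hrlt : (j + 1) % signal.length < signal.length := Nat.mod_lt _ hL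
      rw [if_pos (by exact_mod_cast hr0)]
      have h2 : (((j + 1) % signal.length : Nat) : Int) - 1 = (((j + 1) % signal.length - 1 : Nat) : Int) := by
        omega
      rw [h2, PySem.List.pyGetD_natCast]
      rw [accPrefix_getD 0 signal _ (by omega)]
      rw [show (j + 1) % signal.length - 1 + 1 = (j + 1) % signal.length from by omega]
      ring
  · have h0 : offset.toNat = 0 := by omega
    simp [csum, csum_alt, h0, csumGo, hoff]

-- ===== VERDICT (by name: the statement is the Claim_ definition above) =====
theorem csum_spec : Claim_equal_csum := by
  intro signal offset _ hpre
  unfold Spec_csum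
  exact main_eq signal offset hpre
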